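-- pv_equiv track=rewrite | github.com/jbusecke/pangeo-forge-esgf | pangeo_forge_esgf/parsing.py | split_square_brackets
-- ===== SOURCE A (Python) =====
-- from typing import Optional, List
--
-- def split_square_brackets(facet_string: str) -> List[str]:
--     ## split a string like this `a.[b1, b2].c.[d1, d2]` into a list like this: ['a.b1.c.d1', 'a.b1.c.d2', 'a.b2.c.d1', 'a.b2.c.d2']
--     if "[" not in facet_string:
--         return [facet_string]
--
--     start_index = facet_string.find("[")
--     end_index = facet_string.find("]")
--     prefix = facet_string[:start_index]
--     suffix = facet_string[end_index + 1 :]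
--
--     inner_parts = [
--         part.strip() for part in facet_string[start_index + 1 : end_index].split(",")
--     ]
--
--     split_iid_combinations = []
--     for part in inner_parts:
--         inner_combinations = split_square_brackets(part + suffix)
--         for inner_combination in inner_combinations:
--             split_iid_combinations.append(prefix + inner_combination)
--
--     return split_iid_combinations
-- ===== SOURCE B (Python) =====
-- from typing import List
--
--
-- def split_square_brackets(facet_string: str) -> List[str]:
--     # Iterative accumulator version: expand each bracket group once, left to right.
--     results = [""]
--     s = facet_string
--     while "[" in s:
--         start_index = s.find("[")
--         end_index = s.find("]")
--         prefix = s[:start_index]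
--         parts = [part.strip() for part in s[start_index + 1 : end_index].split(",")]
--         suffix = s[end_index + 1 :]
--         results = [r + prefix + part for r in results for part in parts]
--         s = suffix
--     return [r + s for r in results]
-- ===== Notes on version B (the rewrite author's own statement) =====
-- stated objective: alternative
-- what changed: A's recursive expansion (which re-parses part+suffix for every part, multiplying the parsing work over groups) is replaced by an iterative left-to-right accumulator loop that parses each bracket group exactly once and takes the cartesian product into a running results list.
-- outside the precondition, e.g. on split_square_brackets('['): A raises RecursionError, B does not finish within the time limit; on split_square_brackets('a[b'): A raises RecursionError, B does not finish within the time limit; on split_square_brackets('a[[b],c]'): A returns ['ab', 'ac'], B returns ['a[b,c]']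
import Mathlib
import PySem

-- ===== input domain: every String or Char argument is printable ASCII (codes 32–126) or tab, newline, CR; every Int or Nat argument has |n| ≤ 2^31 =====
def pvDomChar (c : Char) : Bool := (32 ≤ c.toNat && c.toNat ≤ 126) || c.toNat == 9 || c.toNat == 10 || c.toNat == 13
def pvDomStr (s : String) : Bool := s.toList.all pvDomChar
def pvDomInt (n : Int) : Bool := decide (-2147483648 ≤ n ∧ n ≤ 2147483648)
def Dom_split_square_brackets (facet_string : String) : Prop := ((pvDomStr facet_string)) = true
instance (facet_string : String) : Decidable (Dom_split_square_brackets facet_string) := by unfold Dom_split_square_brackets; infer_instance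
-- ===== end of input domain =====

-- B replaces A's recursive cartesian expansion by a single left-to-right accumulator loop
-- (objective: alternative decomposition; same find/slice parsing, each bracket group parsed once).

-- ===== PORT A =====
-- Literal port of A's recursion; `fuel` bounds the recursion depth (Python has no such bound and
-- can recurse forever on malformed inputs; on inputs satisfying Pre_ the fuel is never exhausted).
def pvGoA : Nat → List Char → List (List Char)
  | 0, _ => []
  | fuel+1, s =>
    if PySem.Chars.isIn ['['] s = false then [s]
    else
      let si := PySem.Chars.find s ['[']
      let ei := PySem.Chars.find s [']']
      let pre := PySem.Chars.slice s none (some si)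
      let suf := PySem.Chars.slice s (some (ei + 1)) none
      let parts := (PySem.Chars.splitOn (PySem.Chars.slice s (some (si + 1)) (some ei)) [',']).map
        (fun p => PySem.Chars.strip p)
      parts.foldl (fun acc part =>
        (pvGoA fuel (part ++ suf)).foldl (fun acc2 ic => acc2 ++ [pre ++ ic]) acc) []

def split_square_brackets (facet_string : String) : List String :=
  (pvGoA (facet_string.toList.length + 1) facet_string.toList).map String.ofList

-- ===== PORT B =====
-- Literal port of B's while-loop; `fuel` bounds the number of loop iterations (each iteration of
-- the Python loop consumes the text up to the first ']'; on Pre_ inputs the fuel is never exhausted).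
def pvGoB : Nat → List (List Char) → List Char → List (List Char)
  | 0, results, s => results.map (fun r => r ++ s)
  | fuel+1, results, s =>
    if PySem.Chars.isIn ['['] s then
      let si := PySem.Chars.find s ['[']
      let ei := PySem.Chars.find s [']']
      let pre := PySem.Chars.slice s none (some si)
      let parts := (PySem.Chars.splitOn (PySem.Chars.slice s (some (si + 1)) (some ei)) [',']).map
        (fun p => PySem.Chars.strip p)
      let suf := PySem.Chars.slice s (some (ei + 1)) none
      pvGoB fuel (results.flatMap (fun r => parts.map (fun p => r ++ pre ++ p))) suf
    else results.map (fun r => r ++ s)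

def split_square_brackets_alt (facet_string : String) : List String :=
  (pvGoB (facet_string.toList.length + 1) [[]] facet_string.toList).map String.ofList

-- ===== PRECONDITION & SPEC =====
-- pvOk inside cs: scans cs; a '[' may not occur inside an open group, every '[' must be closed.
def pvOk : Bool → List Char → Bool
  | inside, [] => !inside
  | inside, c :: r => if c = '[' then !inside && pvOk true r else if c = ']' then pvOk false r else pvOk inside r

-- Pre_ excludes malformed facet strings in which some '[' group is unclosed or contains a nested
-- '[': there Python A either hits the recursion limit (no closing ']' remains) or returns an
-- accidental re-parse of the malformed group, and B's single-pass reading is equally defensible.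
def Pre_split_square_brackets (facet_string : String) : Prop :=
  pvOk false facet_string.toList = true
instance (facet_string : String) : Decidable (Pre_split_square_brackets facet_string) := by
  unfold Pre_split_square_brackets; infer_instance

def pvWitness_split_square_brackets : String := "a.[b1, b2].c.[d1, d2]"

def Spec_split_square_brackets (facet_string : String) (out : List String) : Prop := out = split_square_brackets_alt facet_string
instance (facet_string : String) (out : List String) : Decidable (Spec_split_square_brackets facet_string out) := by unfold Spec_split_square_brackets; infer_instance

-- ===== CLAIM (what is proved, stated in full; the proofs are below) =====
def Claim_equal_split_square_brackets : Prop := ∀ (facet_string : String), Dom_split_square_brackets facet_string → Pre_split_square_brackets facet_string → Spec_split_square_brackets facet_string (split_square_brackets facet_string)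

-- ===== LEMMAS AND PROOFS =====
lemma pvOk_append_left (p t : List Char) (hp : '[' ∉ p) :
    pvOk false (p ++ t) = pvOk false t := by
  induction p with
  | nil => rfl
  | cons c r ih =>
    simp only [List.mem_cons, not_or] at hp
    simp only [List.cons_append, pvOk]
    rw [if_neg (fun e => hp.1 e.symm)]
    split_ifs <;> exact ih hp.2

lemma pvOk_true_append (w : List Char) (x : List Char)
    (hw : ∀ c ∈ w, c ≠ '[' ∧ c ≠ ']') :
    pvOk true (w ++ ']' :: x) = pvOk false x := by
  induction w with
  | nil => simp [pvOk]
  | cons c r ih =>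
    have h := hw c (by simp)
    simp only [List.cons_append, pvOk, if_neg h.1, if_neg h.2]
    exact ih (fun d hd => hw d (by simp [hd]))

lemma pvOk_true_decomp (v : List Char) (h : pvOk true v = true) :
    ∃ w x, v = w ++ ']' :: x ∧ (∀ c ∈ w, c ≠ '[' ∧ c ≠ ']') ∧ pvOk false x = true := by
  induction v with
  | nil => simp [pvOk] at h
  | cons c r ih =>
    by_cases h1 : c = '['
    · simp [pvOk, h1] at h
    · by_cases h2 : c = ']'
      · subst h2
        simp only [pvOk, if_neg h1] at h
        exact ⟨[], r, by simp, by simp, h⟩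
      · simp only [pvOk, if_neg h1, if_neg h2] at h
        obtain ⟨w, x, rfl, hw, hx⟩ := ih h
        exact ⟨c :: w, x, by simp, by
          intro d hd
          rcases List.mem_cons.1 hd with rfl | hd
          · exact ⟨h1, h2⟩
          · exact hw d hd, hx⟩

lemma pvOk_decomp (s : List Char) (h : pvOk false s = true) (hm : '[' ∈ s) :
    ∃ u w x, s = u ++ '[' :: (w ++ ']' :: x) ∧ '[' ∉ u ∧
      (∀ c ∈ w, c ≠ '[' ∧ c ≠ ']') ∧ pvOk false x = true := by
  induction s with
  | nil => simp at hm
  | cons c r ih =>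
    by_cases h1 : c = '['
    · subst h1
      simp only [pvOk, Bool.not_false, Bool.true_and] at h
      obtain ⟨w, x, rfl, hw, hx⟩ := pvOk_true_decomp r h
      exact ⟨[], w, x, by simp, by simp, hw, hx⟩
    · have hm' : '[' ∈ r := by
        rcases List.mem_cons.1 hm with h' | h'
        · exact absurd h'.symm h1
        · exact h'
      have h' : pvOk false r = true := by
        by_cases h2 : c = ']'
        · simpa [pvOk, h1, h2] using h
        · simpa [pvOk, h1, h2] using h
      obtain ⟨u, w, x, rfl, hu, hw, hx⟩ := ih h' hm'
      exact ⟨c :: u, w, x, by simp, by simp only [List.mem_cons, not_or]; exact ⟨fun e => h1 e.symm, hu⟩, hw, hx⟩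

lemma pvPrefix_singleton (c : Char) (l : List Char) :
    [c] <+: l ↔ ∃ t, l = c :: t := by
  constructor
  · rintro ⟨t, rfl⟩; exact ⟨t, rfl⟩
  · rintro ⟨t, rfl⟩; exact ⟨t, rfl⟩

lemma pvDrop_append {α : Type} (p t : List α) (i : Nat) (h : p.length ≤ i) :
    (p ++ t).drop i = t.drop (i - p.length) := by
  have hi : i = p.length + (i - p.length) := by omega
  conv_lhs => rw [hi]
  exact List.drop_length_add_append _

lemma pvFind_eq_of (s sub : List Char) (j : Nat)
    (h1 : sub <+: s.drop j) (h2 : ∀ i < j, ¬ sub <+: s.drop i) :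
    PySem.Chars.find s sub = (j : Int) := by
  have hinf : sub <:+: s := h1.isInfix.trans (List.drop_suffix j s).isInfix
  have hnn : 0 ≤ PySem.Chars.find s sub := (PySem.Chars.find_nonneg_iff s sub).2 hinf
  obtain ⟨hp, hmin⟩ := PySem.Chars.find_spec hnn
  have : (PySem.Chars.find s sub).toNat = j := by
    rcases Nat.lt_trichotomy (PySem.Chars.find s sub).toNat j with h | h | h
    · exact absurd hp (h2 _ h)
    · exact h
    · exact absurd h1 (hmin j h)
  omega

lemma pvFind_cons_self (c : Char) (v : List Char) :
    PySem.Chars.find (c :: v) [c] = 0 := by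
  simpa using pvFind_eq_of (c :: v) [c] 0 ⟨v, rfl⟩ (by omega)

lemma pvFind_append (p t : List Char) (c : Char) (hc : c ∉ p) (hm : c ∈ t) :
    PySem.Chars.find (p ++ t) [c] = p.length + PySem.Chars.find t [c] := by
  have hnn : 0 ≤ PySem.Chars.find t [c] :=
    (PySem.Chars.find_nonneg_iff t [c]).2 ((List.singleton_infix_iff _ _).2 hm)
  obtain ⟨hp, hmin⟩ := PySem.Chars.find_spec hnn
  set k := (PySem.Chars.find t [c]).toNat with hk
  have heq := pvFind_eq_of (p ++ t) [c] (p.length + k)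
    (by rw [List.drop_length_add_append]; exact hp)
    (by intro i hi hpre
        rw [pvPrefix_singleton] at hpre
        obtain ⟨tl, htl⟩ := hpre
        by_cases hip : i < p.length
        · have hg : (p ++ t)[i]? = some c := by rw [← List.head?_drop, htl]; rfl
          rw [List.getElem?_append, if_pos hip] at hg
          exact hc (List.mem_of_getElem? hg)
        · have hi' : i - p.length < k := by omega
          apply hmin (i - p.length) hi'
          rw [pvPrefix_singleton]
          exact ⟨tl, by rw [← pvDrop_append p t i (by omega), htl]⟩)
  rw [heq]
  push_cast
  omega

lemma pvFind_singleton (u v : List Char) (c : Char) (hc : c ∉ u) :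
    PySem.Chars.find (u ++ c :: v) [c] = u.length := by
  rw [pvFind_append u (c :: v) c hc (by simp), pvFind_cons_self]
  ring

lemma pvSlice_shift {α : Type} (p t : List α) (a b : Int) (ha : 0 ≤ a) (hb : 0 ≤ b) :
    PySem.List.slice (p ++ t) (some ((p.length : Int) + a)) (some ((p.length : Int) + b)) =
      PySem.List.slice t (some a) (some b) := by
  rw [PySem.List.slice_toNat _ (by omega) (by omega), PySem.List.slice_toNat _ ha hb]
  have h1 : ((p.length : Int) + a).toNat = p.length + a.toNat := by omega
  have h2 : ((p.length : Int) + b).toNat - ((p.length : Int) + a).toNat = b.toNat - a.toNat := by omega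
  rw [h2, h1, List.drop_length_add_append]

lemma pvSlice_from_shift {α : Type} (p t : List α) (a : Int) (ha : 0 ≤ a) :
    PySem.List.slice (p ++ t) (some ((p.length : Int) + a)) none =
      PySem.List.slice t (some a) none := by
  rw [PySem.List.slice_from _ (by omega), PySem.List.slice_from _ ha]
  have h1 : ((p.length : Int) + a).toNat = p.length + a.toNat := by omega
  rw [h1, List.drop_length_add_append]

lemma pvSlice_to_append {α : Type} (p t : List α) (a : Int) (ha : 0 ≤ a) :
    PySem.List.slice (p ++ t) none (some ((p.length : Int) + a)) =
      p ++ PySem.List.slice t none (some a) := by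
  rw [PySem.List.slice_to _ (by omega), PySem.List.slice_to _ ha]
  have h1 : ((p.length : Int) + a).toNat = p.length + a.toNat := by omega
  rw [h1, List.take_length_add_append]

lemma pvMem_of_mem_strip (p : List Char) (c : Char) (hc : c ∈ PySem.Chars.strip p) : c ∈ p := by
  simp only [PySem.Chars.strip, PySem.Chars.rstrip, PySem.Chars.lstrip] at hc
  rw [List.mem_reverse] at hc
  have h1 := (List.dropWhile_sublist _).mem hc
  rw [List.mem_reverse] at h1
  exact (List.dropWhile_sublist _).mem h1

lemma pvGo_zero (sep l cur : List Char) (acc : List (List Char)) :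
    PySem.Chars.splitOn.go sep 0 l cur acc = ((cur.reverse ++ l) :: acc).reverse := rfl

lemma pvGo_nil (sep cur : List Char) (acc : List (List Char)) (f : Nat) :
    PySem.Chars.splitOn.go sep (f+1) [] cur acc = (cur.reverse :: acc).reverse := rfl

lemma pvGo_cons (sep cur : List Char) (acc : List (List Char)) (f : Nat) (c : Char) (rest : List Char) :
    PySem.Chars.splitOn.go sep (f+1) (c :: rest) cur acc =
      if sep.isPrefixOf (c :: rest) then
        PySem.Chars.splitOn.go sep f (List.drop sep.length (c :: rest)) [] (cur.reverse :: acc)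
      else PySem.Chars.splitOn.go sep f rest (c :: cur) acc := rfl

lemma pvSplitOn_go_subset (sep : List Char) :
    ∀ (fuel : Nat) (l cur : List Char) (acc : List (List Char)) (out : List Char),
      out ∈ PySem.Chars.splitOn.go sep fuel l cur acc → ∀ c ∈ out, c ∈ l ∨ c ∈ cur ∨ ∃ a ∈ acc, c ∈ a := by
  intro fuel
  induction fuel with
  | zero =>
    intro l cur acc out hout c hc
    rw [pvGo_zero, List.mem_reverse, List.mem_cons] at hout
    rcases hout with rfl | h
    · rcases List.mem_append.1 hc with h | h
      · exact Or.inr (Or.inl (List.mem_reverse.1 h))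
      · exact Or.inl h
    · exact Or.inr (Or.inr ⟨out, h, hc⟩)
  | succ f ih =>
    intro l cur acc out hout c hc
    match l with
    | [] =>
      rw [pvGo_nil, List.mem_reverse, List.mem_cons] at hout
      rcases hout with rfl | h
      · exact Or.inr (Or.inl (List.mem_reverse.1 hc))
      · exact Or.inr (Or.inr ⟨out, h, hc⟩)
    | d :: rest =>
      rw [pvGo_cons] at hout
      split_ifs at hout with hpre
      · rcases ih _ _ _ _ hout c hc with h | h | ⟨a, ha, hca⟩
        · exact Or.inl (List.drop_subset _ _ h)
        · simp at h
        · rcases List.mem_cons.1 ha with rfl | ha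
          · exact Or.inr (Or.inl (List.mem_reverse.1 hca))
          · exact Or.inr (Or.inr ⟨a, ha, hca⟩)
      · rcases ih _ _ _ _ hout c hc with h | h | ⟨a, ha, hca⟩
        · exact Or.inl (List.mem_cons_of_mem d h)
        · rcases List.mem_cons.1 h with rfl | h
          · exact Or.inl List.mem_cons_self
          · exact Or.inr (Or.inl h)
        · exact Or.inr (Or.inr ⟨a, ha, hca⟩)

lemma pvMem_of_mem_splitOn (s sep p : List Char) (c : Char)
    (hp : p ∈ PySem.Chars.splitOn s sep) (hc : c ∈ p) : c ∈ s := by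
  have := pvSplitOn_go_subset sep (s.length + 1) s [] [] p hp c hc
  rcases this with h | h | ⟨a, ha, _⟩
  · exact h
  · simp at h
  · simp at ha
lemma pvGoA_foldl_eq (parts : List (List Char)) (pre suf : List Char) (fuel : Nat) :
    (parts.foldl (fun acc part =>
        (pvGoA fuel (part ++ suf)).foldl (fun acc2 ic => acc2 ++ [pre ++ ic]) acc) []) =
      parts.flatMap (fun part => (pvGoA fuel (part ++ suf)).map (fun ic => pre ++ ic)) := by
  simp only [PySem.List.foldl_append_singleton_eq_map]
  rw [← List.foldl_map, PySem.List.foldl_append_eq_flatMap, List.flatMap_map]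
  simp [List.flatMap_def]

lemma pvIsIn_singleton (c : Char) (s : List Char) :
    PySem.Chars.isIn [c] s = true ↔ c ∈ s := by
  rw [PySem.Chars.isIn_iff_infix, List.singleton_infix_iff]

lemma pvGoA_absorb (p t : List Char) (hp : ∀ c ∈ p, c ≠ '[' ∧ c ≠ ']')
    (ht : pvOk false t = true) (f : Nat) :
    pvGoA f (p ++ t) = (pvGoA f t).map (fun c => p ++ c) := by
  have hpl : '[' ∉ p := fun h => (hp _ h).1 rfl
  have hpr : ']' ∉ p := fun h => (hp _ h).2 rfl
  cases f with
  | zero => simp [pvGoA]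
  | succ f =>
    by_cases hmem : '[' ∈ t
    · obtain ⟨u, w, x, hdec, hu, hw, hx⟩ := pvOk_decomp t ht hmem
      have hrb : ']' ∈ t := by rw [hdec]; simp
      have hb1 : PySem.Chars.isIn ['['] (p ++ t) = true :=
        (pvIsIn_singleton _ _).2 (List.mem_append.2 (Or.inr hmem))
      have hb2 : PySem.Chars.isIn ['['] t = true := (pvIsIn_singleton _ _).2 hmem
      have hsi : 0 ≤ PySem.Chars.find t ['['] :=
        (PySem.Chars.find_nonneg_iff t ['[']).2 ((List.singleton_infix_iff _ _).2 hmem)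
      have hei : 0 ≤ PySem.Chars.find t [']'] :=
        (PySem.Chars.find_nonneg_iff t [']']).2 ((List.singleton_infix_iff _ _).2 hrb)
      have hf1 := pvFind_append p t '[' hpl hmem
      have hf2 := pvFind_append p t ']' hpr hrb
      simp only [pvGoA, hb1, hb2, Bool.true_eq_false, if_false]
      rw [hf1, hf2]
      have e1 : (p.length : Int) + PySem.Chars.find t ['['] + 1 =
          (p.length : Int) + (PySem.Chars.find t ['['] + 1) := by ring
      have e2 : (p.length : Int) + PySem.Chars.find t [']'] + 1 =
          (p.length : Int) + (PySem.Chars.find t [']'] + 1) := by ring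
      simp only [PySem.Chars.slice_eq_listSlice]
      rw [e1, e2, pvSlice_to_append p t _ hsi, pvSlice_shift p t _ _ (by omega) hei,
        pvSlice_from_shift p t _ (by omega)]
      rw [pvGoA_foldl_eq, pvGoA_foldl_eq]
      simp [List.map_flatMap, List.map_map, Function.comp_def, List.append_assoc]
    · have hb1 : PySem.Chars.isIn ['['] (p ++ t) = false := by
        rw [← Bool.not_eq_true, pvIsIn_singleton]
        simp [hpl, hmem]
      have hb2 : PySem.Chars.isIn ['['] t = false := by
        rw [← Bool.not_eq_true, pvIsIn_singleton]; exact hmem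
      simp [pvGoA, hb1, hb2]

lemma pvFlatten_singleton {α β : Type} (l : List α) (f : α → List β) :
    (List.map (fun r => [f r]) l).flatten = List.map f l := by
  induction l with
  | nil => rfl
  | cons a t ih => simp [ih]

lemma pvMain : ∀ (n : Nat) (s : List Char), s.length ≤ n → pvOk false s = true →
    ∀ (f g : Nat) (results : List (List Char)), s.length < f → s.length < g →
      pvGoB f results s = results.flatMap (fun r => (pvGoA g s).map (fun c => r ++ c)) := by
  intro n
  induction n with
  | zero =>
    intro s hn hok f g results hf hg
    have hs : s = [] := List.length_eq_zero_iff.1 (Nat.le_zero.1 hn)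
    subst hs
    obtain ⟨f', rfl⟩ : ∃ f', f = f' + 1 := ⟨f - 1, by omega⟩
    obtain ⟨g', rfl⟩ : ∃ g', g = g' + 1 := ⟨g - 1, by omega⟩
    have hb : PySem.Chars.isIn ['['] ([] : List Char) = false := by decide
    simp [pvGoB, pvGoA, hb, List.flatMap, pvFlatten_singleton]
  | succ n ih =>
    intro s hn hok f g results hf hg
    obtain ⟨f', rfl⟩ : ∃ f', f = f' + 1 := ⟨f - 1, by omega⟩
    obtain ⟨g', rfl⟩ : ∃ g', g = g' + 1 := ⟨g - 1, by omega⟩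
    by_cases hmem : '[' ∈ s
    · obtain ⟨u, w, x, hdec, hu, hw, hx⟩ := pvOk_decomp s hok hmem
      subst hdec
      set s := u ++ '[' :: (w ++ ']' :: x) with hs
      have hb : PySem.Chars.isIn ['['] s = true := (pvIsIn_singleton _ _).2 hmem
      have hsi : PySem.Chars.find s ['['] = (u.length : Int) := pvFind_singleton u _ '[' hu
      have hslen : s.length = u.length + 1 + w.length + 1 + x.length := by simp [hs]; omega
      by_cases hru : ']' ∈ u
      · -- stray ']' before the first '[': the group is read as empty, text resumes after that ']'
        have hnn : 0 ≤ PySem.Chars.find s [']'] :=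
          (PySem.Chars.find_nonneg_iff _ _).2 ((List.singleton_infix_iff _ _).2 (by rw [hs]; simp [hru]))
        obtain ⟨hpj, hmin⟩ := PySem.Chars.find_spec hnn
        set j := (PySem.Chars.find s [']']).toNat with hj
        obtain ⟨k, hk, hkc⟩ := List.mem_iff_getElem.1 hru
        have hpk : [']'] <+: s.drop k := by
          rw [hs, List.drop_append_of_le_length (le_of_lt hk), List.drop_eq_getElem_cons hk, hkc]
          exact ⟨_, rfl⟩
        have hjk : j ≤ k := by
          by_contra hlt
          exact hmin k (by omega) hpk
        have hju : j < u.length := by omega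
        have hei : PySem.Chars.find s [']'] = (j : Int) := by omega
        have hdropj : s.drop (j + 1) = u.drop (j + 1) ++ '[' :: (w ++ ']' :: x) := by
          rw [hs, List.drop_append_of_le_length (by omega)]
        have hoksuf : pvOk false (s.drop (j + 1)) = true := by
          rw [hdropj, pvOk_append_left _ _ (fun hmem' => hu (List.drop_subset _ _ hmem'))]
          simpa [pvOk, pvOk_true_append w x hw] using hx
        have hlensuf : (s.drop (j + 1)).length ≤ s.length - 1 := by
          rw [List.length_drop]; omega
        -- unfold one step of both programs
        simp only [pvGoB, pvGoA, hb, Bool.true_eq_false, if_false, if_true]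
        rw [hsi, hei]
        simp only [PySem.Chars.slice_eq_listSlice]
        have hinner : PySem.List.slice s (some ((u.length : Int) + 1)) (some ((j : Int))) = [] := by
          rw [PySem.List.slice_toNat _ (by omega) (by omega)]
          have : ((j : Int)).toNat - ((u.length : Int) + 1).toNat = 0 := by omega
          rw [this]
          simp
        have hpre : PySem.List.slice s none (some ((u.length : Int))) = u := by
          rw [PySem.List.slice_to _ (by omega)]
          simp only [hs]; exact List.take_left
        have hsuf : PySem.List.slice s (some ((j : Int) + 1)) none = s.drop (j + 1) := by
          have h1 : ((j : Int) + 1).toNat = j + 1 := by omega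
          rw [PySem.List.slice_from _ (by omega), h1]
        rw [hinner, hpre, hsuf]
        have hparts : (PySem.Chars.splitOn [] [',']).map (fun p => PySem.Chars.strip p) = [[]] := rfl
        rw [hparts]
        rw [ih (s.drop (j + 1)) (by omega) hoksuf f' g' _ (by omega) (by omega)]
        rw [pvGoA_foldl_eq]
        simp only [List.flatMap_def]
        simp [pvFlatten_singleton, Function.comp_def, List.append_assoc]
      · -- well-formed group: first ']' is the one closing the '['
        have hp1 : s = (u ++ '[' :: w) ++ ']' :: x := by simp [hs]
        have hnr : ']' ∉ u ++ '[' :: w := by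
          intro hmem'
          rcases List.mem_append.1 hmem' with h | h
          · exact hru h
          · rcases List.mem_cons.1 h with h' | h'
            · exact absurd h'.symm (by decide)
            · exact (hw _ h').2 rfl
        have hei : PySem.Chars.find s [']'] = ((u.length + 1 + w.length : Nat) : Int) := by
          rw [hp1, pvFind_singleton _ x ']' hnr]
          simp
          omega
        have hb2 : PySem.Chars.isIn ['['] s = true := hb
        have hdrop1 : s.drop (u.length + 1) = w ++ ']' :: x := by
          rw [show u.length + 1 = (u ++ ['[']).length by simp, hs, show u ++ '[' :: (w ++ ']' :: x) = (u ++ ['[']) ++ (w ++ ']' :: x) by simp, List.drop_left]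
        have hinner : PySem.List.slice s (some ((u.length : Int) + 1)) (some ((u.length + 1 + w.length : Nat) : Int)) = w := by
          rw [PySem.List.slice_toNat _ (by omega) (by omega)]
          have h1 : ((u.length : Int) + 1).toNat = u.length + 1 := by omega
          have h2 : (((u.length + 1 + w.length : Nat) : Int)).toNat - (u.length + 1) = w.length := by omega
          rw [h1, h2, hdrop1]
          exact List.take_left
        have hpre : PySem.List.slice s none (some ((u.length : Int))) = u := by
          rw [PySem.List.slice_to _ (by omega)]
          simp only [hs]; exact List.take_left
        have hsuf : PySem.List.slice s (some (((u.length + 1 + w.length : Nat) : Int) + 1)) none = x := by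
          rw [PySem.List.slice_from _ (by omega)]
          have h1 : (((u.length + 1 + w.length : Nat) : Int) + 1).toNat = (u ++ '[' :: w ++ [']']).length := by simp; omega
          rw [h1, hs, show u ++ '[' :: (w ++ ']' :: x) = (u ++ '[' :: w ++ [']']) ++ x by simp, List.drop_left]
        have hpartsfree : ∀ part ∈ (PySem.Chars.splitOn w [',']).map (fun p => PySem.Chars.strip p),
            ∀ c ∈ part, c ≠ '[' ∧ c ≠ ']' := by
          intro part hpart c hc
          obtain ⟨q, hq, rfl⟩ := List.mem_map.1 hpart
          exact hw c (pvMem_of_mem_splitOn w [','] q c hq (pvMem_of_mem_strip q c hc))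
        simp only [pvGoB, pvGoA, hb, Bool.true_eq_false, if_false, if_true]
        rw [hsi, hei]
        simp only [PySem.Chars.slice_eq_listSlice]
        rw [hinner, hpre, hsuf]
        rw [pvGoA_foldl_eq]
        rw [ih x (by omega) hx f' g' _ (by omega) (by omega)]
        have habs2 : ∀ q ∈ PySem.Chars.splitOn w [','],
            pvGoA g' (PySem.Chars.strip q ++ x) =
              (pvGoA g' x).map (fun c => PySem.Chars.strip q ++ c) := fun q hq =>
          pvGoA_absorb _ x (hpartsfree _ (List.mem_map_of_mem hq)) hx g'
        simp only [List.flatMap_def, List.map_map, Function.comp_def]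
        have hmapeq : (PySem.Chars.splitOn w [',']).map
              (fun q => (pvGoA g' (PySem.Chars.strip q ++ x)).map (fun ic => u ++ ic)) =
            (PySem.Chars.splitOn w [',']).map
              (fun q => ((pvGoA g' x).map (fun c => PySem.Chars.strip q ++ c)).map (fun ic => u ++ ic)) :=
          List.map_congr_left (fun q hq => by rw [habs2 q hq])
        rw [hmapeq]
        simp [List.map_flatten, List.flatten_flatten, List.map_map, Function.comp_def, List.append_assoc]
    · have hb : PySem.Chars.isIn ['['] s = false := by
        rw [← Bool.not_eq_true, pvIsIn_singleton]; exact hmem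
      simp [pvGoB, pvGoA, hb, List.flatMap_def, pvFlatten_singleton]

-- ===== VERDICT (by name: the statement is the Claim_ definition above) =====
theorem split_square_brackets_spec : Claim_equal_split_square_brackets := by
  intro s _ hpre
  unfold Spec_split_square_brackets split_square_brackets split_square_brackets_alt
  rw [pvMain s.toList.length s.toList le_rfl hpre _ _ [[]] (Nat.lt_succ_self _) (Nat.lt_succ_self _)]
  simp
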